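-- pv_equiv track=rewrite | github.com/xLucyu/NK-Girl | ce.py | get_seed_long
-- ===== SOURCE A (Python) =====
-- TWO64 = 1 << 64
--
-- TWO63 = 1 << 63
--
-- def to_long(x: int) -> int:
--     v = x & (TWO64 - 1)
--     if v >= TWO63:
--         v -= TWO64
--     return v
--
-- def long_abs(x: int) -> int:
--     if x == -TWO63:
--         return x
--     return -x if x < 0 else x
--
-- def I64(s: str) -> int:
--     result = 0
--     for c in s:
--         digit = ord(c) - 48
--         result = to_long(to_long(result * 10) + digit)
--     return result
--
-- def get_seed_long(event_id: str) -> int: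
--     sb = ""
--     for c in event_id:
--         sb += str(ord(c))
--     if len(sb) > 18:
--         sb = sb[:18]
--     parsed = I64(sb)
--     return long_abs(parsed)
-- ===== SOURCE B (Python) =====
-- def get_seed_long(event_id: str) -> int:
--     # Accumulate the seed numerically: no concatenated string is built or parsed,
--     # and no 64-bit wraparound handling is needed since at most 18 digits are consumed.
--     result = 0
--     count = 0
--     for c in event_id:
--         for ch in str(ord(c)):
--             result = result * 10 + (ord(ch) - 48)
--             count += 1
--             if count == 18:
--                 return result
--     return result
-- ===== Notes on version B (the rewrite author's own statement) =====
-- stated objective: faster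
-- what changed: B computes the seed by direct numeric accumulation with a digit counter and an early return once 18 digits are consumed, instead of A's build-a-digit-string-over-the-whole-input, truncate-to-18, parse-with-simulated-64-bit-wraparound, then-absolute-value pipeline; the wraparound and abs machinery is dropped because 18 decimal digits cannot overflow.
import Mathlib
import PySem

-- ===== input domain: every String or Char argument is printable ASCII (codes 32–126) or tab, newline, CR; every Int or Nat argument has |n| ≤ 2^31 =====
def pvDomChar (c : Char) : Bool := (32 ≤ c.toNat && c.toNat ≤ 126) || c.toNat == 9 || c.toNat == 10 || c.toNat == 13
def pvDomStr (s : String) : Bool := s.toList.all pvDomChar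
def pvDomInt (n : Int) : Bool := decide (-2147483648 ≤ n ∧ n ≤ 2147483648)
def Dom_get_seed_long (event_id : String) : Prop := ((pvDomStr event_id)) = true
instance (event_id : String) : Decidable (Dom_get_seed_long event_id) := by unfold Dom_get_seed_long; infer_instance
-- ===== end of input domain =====

-- B computes the seed by direct numeric accumulation with an early stop after 18 digits, instead of
-- A's build-digit-string / truncate / parse-with-simulated-64-bit-wraparound / absolute-value pipeline.

-- ===== PORT A =====

def TWO64 : Int := 1 <<< (64 : Nat)
def TWO63 : Int := 1 <<< (63 : Nat)

def to_long (x : Int) : Int :=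
  let v := PySem.Int.band x (TWO64 - 1)
  if v ≥ TWO63 then v - TWO64 else v

def long_abs (x : Int) : Int :=
  if x = -TWO63 then x else if x < 0 then -x else x

-- I64 works on the character list of its string argument
def I64 (s : List Char) : Int :=
  s.foldl (fun result c => to_long (to_long (result * 10) + ((c.toNat : Int) - 48))) 0

def get_seed_long (event_id : String) : Int :=
  let sb : List Char :=
    event_id.toList.foldl (fun sb c => sb ++ PySem.Int.toChars ((c.toNat : Int))) []
  let sb := if sb.length > 18 then PySem.List.slice sb none (some 18) else sb
  long_abs (I64 sb)

-- ===== PORT B =====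

-- inner loop of B: consume the digit characters of one str(ord(c)); returns
-- (result, count, stopped?) where stopped? signals the early `return` at count = 18
def pvConsume : List Char → Int → Nat → Int × Nat × Bool
  | [], r, k => (r, k, false)
  | ch :: t, r, k =>
    let r' := r * 10 + ((ch.toNat : Int) - 48)
    let k' := k + 1
    if k' = 18 then (r', k', true) else pvConsume t r' k'

def pvAltGo : List Char → Int → Nat → Int
  | [], r, _ => r
  | c :: cs, r, k =>
    match pvConsume (PySem.Int.toChars ((c.toNat : Int))) r k with
    | (r', k', stop) => if stop then r' else pvAltGo cs r' k'

def get_seed_long_alt (event_id : String) : Int :=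
  pvAltGo event_id.toList 0 0

-- ===== PRECONDITION & SPEC =====

def Spec_get_seed_long (event_id : String) (out : Int) : Prop := out = get_seed_long_alt event_id
instance (event_id : String) (out : Int) : Decidable (Spec_get_seed_long event_id out) := by
  unfold Spec_get_seed_long; infer_instance

-- ===== CLAIM =====

def Claim_equal_get_seed_long : Prop :=
  ∀ (event_id : String), Dom_get_seed_long event_id → Spec_get_seed_long event_id (get_seed_long event_id)

-- ===== LEMMAS AND PROOFS =====

theorem pvTWO64_eq : TWO64 = 18446744073709551616 := by decide
theorem pvTWO63_eq : TWO63 = 9223372036854775808 := by decide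

-- plain base-10 accumulation, the common denominator of both programs
def pvAcc (s : List Char) (r : Int) : Int :=
  s.foldl (fun r c => r * 10 + ((c.toNat : Int) - 48)) r

def pvDigits (c : Char) : List Char := PySem.Int.toChars ((c.toNat : Int))

-- str(ord(c)) for a domain character consists of at most 3 decimal digit characters
theorem pvDigitsFact : ∀ n : Nat, n < 127 →
    ((PySem.Int.toChars (n : Int)).all (fun ch => 48 ≤ ch.toNat && ch.toNat ≤ 57)
      && (PySem.Int.toChars (n : Int)).length ≤ 3) = true := by
  decide

theorem pvAcc_nil (r : Int) : pvAcc [] r = r := rfl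
theorem pvAcc_cons (c : Char) (s : List Char) (r : Int) :
    pvAcc (c :: s) r = pvAcc s (r * 10 + ((c.toNat : Int) - 48)) := rfl
theorem pvAcc_append (s t : List Char) (r : Int) : pvAcc (s ++ t) r = pvAcc t (pvAcc s r) :=
  List.foldl_append

def pvIsDigit (c : Char) : Prop := 48 ≤ c.toNat ∧ c.toNat ≤ 57

theorem pvAcc_bounds (s : List Char) (r : Int) (hd : ∀ c ∈ s, pvIsDigit c) (hr : 0 ≤ r) :
    0 ≤ pvAcc s r ∧ pvAcc s r < (r + 1) * 10 ^ s.length := by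
  induction s generalizing r with
  | nil => simpa [pvAcc_nil] using hr
  | cons c t ih =>
    have hc := hd c (by simp)
    have hd' : ∀ x ∈ t, pvIsDigit x := fun x hx => hd x (by simp [hx])
    have h0 : (0:Int) ≤ (c.toNat : Int) - 48 := by
      have := hc.1; omega
    have h9 : ((c.toNat : Int) - 48) ≤ 9 := by
      have := hc.2; omega
    have hr' : 0 ≤ r * 10 + ((c.toNat : Int) - 48) := by nlinarith
    obtain ⟨hlo, hhi⟩ := ih (r * 10 + ((c.toNat : Int) - 48)) hd' hr'
    refine ⟨by simpa [pvAcc_cons] using hlo, ?_⟩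
    rw [pvAcc_cons]
    calc pvAcc t (r * 10 + ((c.toNat : Int) - 48))
        < (r * 10 + ((c.toNat : Int) - 48) + 1) * 10 ^ t.length := hhi
      _ ≤ (r + 1) * 10 * 10 ^ t.length := by nlinarith [pow_pos (show (0:Int) < 10 by norm_num) t.length]
      _ = (r + 1) * 10 ^ (c :: t).length := by rw [List.length_cons, pow_succ]; ring

theorem pv_to_long_id (v : Int) (h0 : 0 ≤ v) (h1 : v < TWO63) : to_long v = v := by
  have h63 := pvTWO63_eq
  have h64 := pvTWO64_eq
  have hmask : PySem.Int.band v (TWO64 - 1) = v := by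
    rw [PySem.Int.band_of_nonneg h0 (by omega)]
    have htn : (TWO64 - 1).toNat = 2 ^ 64 - 1 := by rw [h64]; decide
    rw [htn, Nat.and_two_pow_sub_one_eq_mod, Nat.mod_eq_of_lt (by omega)]
    omega
  simp only [to_long, hmask]
  rw [if_neg (by omega)]

-- I64 with the simulated 64-bit wraparound equals plain accumulation while no overflow can occur
theorem pvI64_eq_acc : ∀ (s : List Char) (r : Int), (∀ c ∈ s, pvIsDigit c) → 0 ≤ r →
    (r + 1) * 10 ^ s.length ≤ TWO63 →
    s.foldl (fun result c => to_long (to_long (result * 10) + ((c.toNat : Int) - 48))) r = pvAcc s r := by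
  intro s
  induction s with
  | nil => intro r _ _ _; rfl
  | cons c t ih =>
    intro r hd hr hb
    have hc := hd c (by simp)
    have hd' : ∀ x ∈ t, pvIsDigit x := fun x hx => hd x (by simp [hx])
    have h9 : ((c.toNat : Int) - 48) ≤ 9 := by
      have := hc.2; omega
    have h0 : (0:Int) ≤ (c.toNat : Int) - 48 := by
      have := hc.1; omega
    have hpow : (1:Int) ≤ 10 ^ t.length := one_le_pow₀ (by norm_num)
    have hb' : (r + 1) * 10 * 10 ^ t.length ≤ TWO63 := by
      calc (r + 1) * 10 * 10 ^ t.length = (r + 1) * 10 ^ (c :: t).length := by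
            rw [List.length_cons, pow_succ]; ring
        _ ≤ TWO63 := hb
    have h10 : r * 10 + 10 ≤ TWO63 := by nlinarith
    have ht1 : to_long (r * 10) = r * 10 := pv_to_long_id _ (by positivity) (by omega)
    have hr' : 0 ≤ r * 10 + ((c.toNat : Int) - 48) := by nlinarith
    have ht2 : to_long (r * 10 + ((c.toNat : Int) - 48)) = r * 10 + ((c.toNat : Int) - 48) :=
      pv_to_long_id _ hr' (by omega)
    have hstep : r * 10 + ((c.toNat : Int) - 48) + 1 ≤ (r + 1) * 10 := by omega
    have hb'' : (r * 10 + ((c.toNat : Int) - 48) + 1) * 10 ^ t.length ≤ TWO63 :=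
      le_trans (mul_le_mul_of_nonneg_right hstep (by positivity)) hb'
    simp only [List.foldl_cons, ht1, ht2, pvAcc_cons]
    exact ih _ hd' hr' hb''

-- the string A builds is the concatenation of the per-character digit strings
theorem pv_sb_eq_flatMap (l : List Char) :
    l.foldl (fun sb c => sb ++ PySem.Int.toChars ((c.toNat : Int))) [] = l.flatMap pvDigits := by
  have h : ∀ (l : List Char) (acc : List Char),
      l.foldl (fun sb c => sb ++ PySem.Int.toChars ((c.toNat : Int))) acc = acc ++ l.flatMap pvDigits := by
    intro l
    induction l with
    | nil => intro acc; simp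
    | cons c t ih => intro acc; simp [List.foldl_cons, ih, pvDigits]
  simpa using h l []

theorem pv_dom_digits (l : List Char) (hdom : l.all pvDomChar = true) :
    ∀ ch ∈ l.flatMap pvDigits, pvIsDigit ch := by
  intro ch hch
  rw [List.mem_flatMap] at hch
  obtain ⟨c, hc, hch⟩ := hch
  have hdc : pvDomChar c = true := by
    rw [List.all_eq_true] at hdom; exact hdom c hc
  have hle : c.toNat < 127 := by
    unfold pvDomChar at hdc
    simp only [Bool.or_eq_true, Bool.and_eq_true, decide_eq_true_eq, beq_iff_eq] at hdc
    omega
  have := pvDigitsFact c.toNat hle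
  rw [Bool.and_eq_true, List.all_eq_true] at this
  have := this.1 ch (by simpa [pvDigits] using hch)
  simp only [Bool.and_eq_true, decide_eq_true_eq] at this
  exact this

-- the inner loop of B, characterised: consume min(len, 18-k) digits
theorem pvConsume_eq (ds : List Char) : ∀ (r : Int) (k : Nat), k < 18 →
    pvConsume ds r k = (pvAcc (ds.take (18 - k)) r, min (k + ds.length) 18, decide (18 ≤ k + ds.length)) := by
  induction ds with
  | nil =>
    intro r k hk
    simp [pvConsume, pvAcc_nil]
    omega
  | cons ch t ih =>
    intro r k hk
    by_cases h18 : k + 1 = 18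
    · have htk : 18 - k = 1 := by omega
      simp only [pvConsume, h18, htk, List.take_succ_cons, List.take_zero]
      rw [pvAcc_cons, pvAcc_nil]
      refine Prod.ext rfl (Prod.ext ?_ ?_) <;> simp <;> omega
    · have hk' : k + 1 < 18 := by omega
      simp only [pvConsume, if_neg h18]
      rw [ih _ (k + 1) hk']
      have htk : 18 - k = (18 - (k + 1)) + 1 := by omega
      rw [htk, List.take_succ_cons, pvAcc_cons]
      refine Prod.ext rfl (Prod.ext ?_ ?_) <;> simp <;> omega

-- the outer loop of B equals plain accumulation over the first 18-k digits of the concatenation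
theorem pvAltGo_eq (cs : List Char) : ∀ (r : Int) (k : Nat), k < 18 →
    pvAltGo cs r k = pvAcc ((cs.flatMap pvDigits).take (18 - k)) r := by
  induction cs with
  | nil => intro r k _; simp [pvAltGo, pvAcc_nil]
  | cons c t ih =>
    intro r k hk
    simp only [pvAltGo]
    rw [show PySem.Int.toChars ((c.toNat : Int)) = pvDigits c from rfl,
        pvConsume_eq (pvDigits c) r k hk, List.flatMap_cons, List.take_append]
    by_cases hstop : 18 ≤ k + (pvDigits c).length
    · rw [decide_eq_true hstop]
      have h0 : 18 - k - (pvDigits c).length = 0 := by omega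
      rw [h0, List.take_zero, List.append_nil]
      simp
    · have hlt : k + (pvDigits c).length < 18 := by omega
      rw [decide_eq_false hstop]
      have hmin : min (k + (pvDigits c).length) 18 = k + (pvDigits c).length := by omega
      simp only [Bool.false_eq_true, if_false, hmin]
      rw [ih _ _ hlt, List.take_of_length_le (show (pvDigits c).length ≤ 18 - k by omega),
        pvAcc_append]
      have heq : 18 - (k + (pvDigits c).length) = 18 - k - (pvDigits c).length := by omega
      rw [heq]

theorem pvTake18 (sb : List Char) :
    (if sb.length > 18 then PySem.List.slice sb none (some 18) else sb) = sb.take 18 := by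
  by_cases h : sb.length > 18
  · rw [if_pos h, PySem.List.slice_to sb (by norm_num)]; rfl
  · rw [if_neg h, List.take_of_length_le (by omega)]

-- A, rewritten: abs of the wraparound-parse of the first 18 digits of the concatenation
theorem pv_A_eq (s : String) :
    get_seed_long s = long_abs (I64 ((s.toList.flatMap pvDigits).take 18)) := by
  show long_abs (I64 (if (s.toList.foldl (fun sb c => sb ++ PySem.Int.toChars ((c.toNat : Int))) []).length > 18
      then PySem.List.slice (s.toList.foldl (fun sb c => sb ++ PySem.Int.toChars ((c.toNat : Int))) []) none (some 18)
      else s.toList.foldl (fun sb c => sb ++ PySem.Int.toChars ((c.toNat : Int))) [])) = _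
  rw [pv_sb_eq_flatMap, pvTake18]

-- ===== VERDICT =====

theorem get_seed_long_spec : Claim_equal_get_seed_long := by
  intro event_id hdom
  unfold Spec_get_seed_long
  have hdom' : event_id.toList.all pvDomChar = true := hdom
  rw [pv_A_eq]
  unfold get_seed_long_alt
  rw [pvAltGo_eq event_id.toList 0 0 (by norm_num)]
  set sb := (event_id.toList.flatMap pvDigits).take (18 - 0) with hsb
  have hdig : ∀ ch ∈ sb, pvIsDigit ch := fun ch hch =>
    pv_dom_digits event_id.toList hdom' ch (List.mem_of_mem_take hch)
  have hlen : sb.length ≤ 18 := by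
    rw [hsb]; exact le_trans (List.length_take_le _ _) (by norm_num)
  have hbound : ((0:Int) + 1) * 10 ^ sb.length ≤ TWO63 := by
    have h1 : (10:Int) ^ sb.length ≤ 10 ^ 18 := pow_le_pow_right₀ (by norm_num) hlen
    have h2 : (10:Int) ^ 18 ≤ TWO63 := by rw [pvTWO63_eq]; norm_num
    omega
  have hI : I64 sb = pvAcc sb 0 := pvI64_eq_acc sb 0 hdig le_rfl hbound
  obtain ⟨hlo, hhi⟩ := pvAcc_bounds sb 0 hdig le_rfl
  have habs : long_abs (pvAcc sb 0) = pvAcc sb 0 := by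
    unfold long_abs
    have hne : pvAcc sb 0 ≠ -TWO63 := by
      rw [pvTWO63_eq]; intro h; rw [h] at hlo; norm_num at hlo
    rw [if_neg hne, if_neg (by omega)]
  rw [hI, habs]
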